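/- GENERATED by tools/from_farm_form.py from prooffarm-gif/accepted/DGifDecompressLine.13/Lemmas.lean (a worked proof of the farm's unit `DGifDecompressLine.13`,
   accepted by the verdict) — do not edit. -/
import Gif.Spec.Units.DGifDecompressLine_13
import Gif.Spec.AllSegs

/-!
  Lemmas for the unit `DGifDecompressLine.13` (segment 13 of the LZW decoder: the three tests of l.974-976, the store
  `Prefix[RunningCode − 2] = LastCode` of l.977, the test of l.979, and `LastCode = CrntCode` of l.995).

  Everything general is in the tree (Gif/Spec/Words.lean, Gif/Spec/LzwCarry.lean: `Body.carry`, `dl_scratch`). What is left: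

      dl13_prefix_addr        `lea r12, [r13 + rax*4 − 8]` with `r13 = Prefix`, `rax = RunningCode`: the address of
                              `Prefix[RunningCode − 2]` as the word of a number
      dl13_main               `Main` at an exit state of the segment (all five exits), with the same measure
-/

open X86 X86.User Asan ProgX.Base ProgX.Base.Spec Gif.Spec

namespace Gif.Spec.DGifDecompressLine_13

/-- **`&Prefix[RunningCode − 2]`** as the walker computes it (`cdqe ; lea r12, [r13 + rax*4 − 8]`, 10700CH … 10700EH; l.976) is
the word of the number `pv + 8536 + 4·(RunningCode − 2)`: `p` = `r13` = `&Prefix[0]`, `2 ≤ rc` by [LZ3]. -/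
theorem dl13_prefix_addr (p : Word) (pv rc : Nat) (hp : p.toNat = pv + 8536) (hpv : pv + 24968 ≤ 0xC00000) (hlo : 2 ≤ rc)
    (hhi : rc ≤ 4097) : p + UInt64.ofNat rc * 4 - 8 = UInt64.ofNat (pv + 8528 + 4 * rc) := by
  have e_rc : (UInt64.ofNat rc).toNat = rc := toNat_ofNat_addr rc (by omega)
  have e_sum : (p + UInt64.ofNat rc * 4).toNat = p.toNat + 4 * rc := add_mul4 p (UInt64.ofNat rc) rc e_rc (by omega)
  have e_sub : (p + UInt64.ofNat rc * 4 - UInt64.ofNat 8).toNat = (p + UInt64.ofNat rc * 4).toNat - 8 :=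
    word_sub_toNat_le _ 8 (by omega)
  apply UInt64.toNat_inj.mp
  rw [toNat_ofNat_addr _ (by omega)]
  show (p + UInt64.ofNat rc * 4 - UInt64.ofNat 8).toNat = pv + 8528 + 4 * rc
  rw [e_sub, e_sum, hp]
  omega

/-- **`Main` THROUGH THE STORES OF THIS SEGMENT.** `v` is the state at 106FEAH with `Main`, `s` an exit state of the segment (the
head 106F7DH, or 106F43H / 107045H): the body's stack pointer, the text unchanged, the ABI's invariant, no shadow byte written, every
window written a scratch window (`hws`: closed by `dl_scratch`), and the four registers of the main loop's allocation (`r14` =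
Private, `r13` = Prefix, `ebx` = StackPtr, `ebp` = i) as they were. Then `Main` holds of `s` at its address, with the same measure.
(`Body` and `Locals` by `Body.carry`; the register clauses by rewriting.) -/
theorem dl13_main {cut cut' : Word} {H : Heap} {rest : List Obj} {frames : List (Nat × FrameLayout)} {F : Forest} {R : Rd}
    {n : Nat} {u₀ e : State} {ret : Word} {v s : State}
    (hmain : DGifDecompressLine.Main cut H rest frames F R n u₀ e ret v)
    (hrip : s.rip = cut') (hrsp : s.reg .rsp = e.reg .rsp - 200)
    (hcode : Mem.EqOn ProgX.Base.L.textLo ProgX.Base.L.textHi u₀.mem s.mem) (habi : (conv u₀).inv s)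
    {ws : List Span} (hun : ShadowUntouched v.mem s.mem) (hs : Mem.SameExcept ws v.mem s.mem)
    (hws : ∀ w, w ∈ ws → DGifDecompressLine.Scratch F n e w)
    (h14 : s.reg .r14 = v.reg .r14) (h13 : s.reg .r13 = v.reg .r13) (hbx : s.reg .rbx = v.reg .rbx)
    (hbp : s.reg .rbp = v.reg .rbp) :
    DGifDecompressLine.Main cut' H rest frames F R n u₀ e ret s ∧ mu R s.mem F.pv = mu R v.mem F.pv := by
  obtain ⟨hbody, hloc, g14, g13, gbx, gbp, gw1⟩ := hmain
  obtain ⟨k_body, k_loc, k_mu, _, _⟩ := hbody.carry (cut' := cut') hrip hrsp hcode habi hun hs hws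
  refine ⟨⟨k_body, k_loc hloc, ?_, ?_, ?_, ?_, ?_⟩, k_mu⟩
  · rw [h14]
    exact g14
  · rw [h13]
    exact g13
  · rw [hbx]
    exact gbx
  · rw [hbp]
    exact gbp
  · rw [hbx, hbp]
    exact gw1

end Gif.Spec.DGifDecompressLine_13
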